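-- pv_equiv track=rewrite | github.com/garciparedes/python-examples | competitive/t3chfest/2018/task_4.py | solution
-- ===== SOURCE A (Python) =====
-- def solution(A):
--     sorted_A = sorted(A)
--     c = 0
--     i = 0
--     while i < len(A):
--         if A[i] != sorted_A[i]:
--             j = i + 1
--             while j < len(A) and A[j] != sorted_A[i]:
--                 j += 1
--             i = j
--         c += 1
--         i += 1
--     return c
-- ===== SOURCE B (Python) =====
-- def solution(A):
--     n = len(A)
--     S = sorted(A)
--     occ = {}
--     for idx in range(n - 1, -1, -1):
--         occ.setdefault(A[idx], []).append(idx)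
--     c = 0
--     i = 0
--     while i < n:
--         c += 1
--         if A[i] != S[i]:
--             stack = occ[S[i]]
--             while stack and stack[-1] <= i:
--                 stack.pop()
--             i = stack.pop() if stack else n
--         i += 1
--     return c
-- ===== Notes on version B (the rewrite author's own statement) =====
-- stated objective: alternative
-- what changed: Instead of A's on-demand forward scan for the next occurrence of sorted_A[i], B precomputes per-value stacks of occurrence indices in one pass and finds each jump target by popping stale entries off the stack for that value.
import Mathlib
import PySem

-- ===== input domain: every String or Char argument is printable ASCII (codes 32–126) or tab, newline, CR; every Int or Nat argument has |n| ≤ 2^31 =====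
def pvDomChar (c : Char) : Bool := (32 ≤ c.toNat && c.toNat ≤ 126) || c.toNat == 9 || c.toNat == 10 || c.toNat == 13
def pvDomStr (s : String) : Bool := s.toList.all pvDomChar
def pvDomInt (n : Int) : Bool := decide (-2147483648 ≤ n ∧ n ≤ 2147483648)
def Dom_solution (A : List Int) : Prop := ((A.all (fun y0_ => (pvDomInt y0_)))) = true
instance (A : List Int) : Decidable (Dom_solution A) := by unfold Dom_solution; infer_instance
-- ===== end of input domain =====

-- B replaces A's on-demand forward scans for the next occurrence of sorted_A[i] by per-value
-- stacks of occurrence indices built once up front (alternative algorithm, same return value).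
-- Both while-loops advance their index by ≥ 1 per iteration, so a fuel of len(A)+1 is exact.

-- ===== PORT A =====
-- inner 'while j < len(A) and A[j] != sorted_A[i]: j += 1' ; returns the final j
def solInner (A : List Int) (v : Int) (fuel : Nat) (j : Int) : Int :=
  match fuel with
  | 0 => j
  | fuel + 1 =>
    if j < (A.length : Int) then
      if PySem.List.pyGetD A j 0 ≠ v then solInner A v fuel (j + 1) else j
    else j

-- outer 'while i < len(A)' loop of A, state (c, i)
def solLoop (A S : List Int) (fuel : Nat) (c i : Int) : Int :=
  match fuel with
  | 0 => c
  | fuel + 1 =>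
    if i < (A.length : Int) then
      if PySem.List.pyGetD A i 0 ≠ PySem.List.pyGetD S i 0 then
        solLoop A S fuel (c + 1)
          (solInner A (PySem.List.pyGetD S i 0) (A.length + 1) (i + 1) + 1)
      else
        solLoop A S fuel (c + 1) (i + 1)
    else c

def solution (A : List Int) : Int :=
  solLoop A (PySem.List.sorted A (fun x => x) false) (A.length + 1) 0 0

-- ===== PORT B =====
-- A Python list used as a stack (append/pop/[-1] at the END) is represented with its END at the
-- Lean list's HEAD: setdefault(v,[]).append(idx) ↦ modify v [] (idx :: ·), stack[-1] ↦ head,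
-- stack.pop() ↦ tail; the in-place mutation of occ[v] is written back with Dict.insert.
def buildOcc (A : List Int) : PySem.Dict Int (List Int) :=
  (PySem.List.pyRange ((A.length : Int) - 1) (-1) (-1)).foldl
    (fun d idx => d.modify (PySem.List.pyGetD A idx 0) [] (fun L => idx :: L))
    PySem.Dict.empty

-- 'while stack and stack[-1] <= i: stack.pop()'
def popStack (i : Int) (s : List Int) : List Int :=
  match s with
  | [] => []
  | t :: rest => if t ≤ i then popStack i rest else t :: rest

-- main 'while i < n' loop of B ('i = stack.pop() if stack else n' then 'i += 1')
def altLoop (A S : List Int) (fuel : Nat) (occ : PySem.Dict Int (List Int)) (c i : Int) : Int :=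
  match fuel with
  | 0 => c
  | fuel + 1 =>
    if i < (A.length : Int) then
      if PySem.List.pyGetD A i 0 ≠ PySem.List.pyGetD S i 0 then
        let s := popStack i (occ.getD (PySem.List.pyGetD S i 0) [])
        altLoop A S fuel (occ.insert (PySem.List.pyGetD S i 0) s.tail) (c + 1)
          ((if s = [] then (A.length : Int) else s.headD 0) + 1)
      else
        altLoop A S fuel occ (c + 1) (i + 1)
    else c

def solution_alt (A : List Int) : Int :=
  altLoop A (PySem.List.sorted A (fun x => x) false) (A.length + 1) (buildOcc A) 0 0

-- ===== PRECONDITION & SPEC =====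
def Spec_solution (A : List Int) (out : Int) : Prop := out = solution_alt A
instance (A : List Int) (out : Int) : Decidable (Spec_solution A out) := by unfold Spec_solution; infer_instance

-- ===== CLAIM (what is proved, stated in full; the proofs are below) =====
def Claim_equal_solution : Prop := ∀ (A : List Int), Dom_solution A → Spec_solution A (solution A)

-- ===== LEMMAS AND PROOFS =====

-- loop invariant: each stored stack is a strictly increasing list of valid occurrence
-- indices of its value that contains every occurrence ≥ the current position i
def LoopInv (A : List Int) (occ : PySem.Dict Int (List Int)) (i : Int) : Prop :=
  ∀ v : Int,
    (occ.getD v []).Pairwise (· < ·) ∧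
    (∀ t ∈ occ.getD v [], 0 ≤ t ∧ t < (A.length : Int) ∧ PySem.List.pyGetD A t 0 = v) ∧
    (∀ k : Int, 0 ≤ k → k < (A.length : Int) → PySem.List.pyGetD A k 0 = v → i ≤ k →
      k ∈ occ.getD v [])

-- full characterisation of A's inner scan (fuel covers the whole remaining range)
theorem solInner_spec (A : List Int) (v : Int) (fuel : Nat) (j : Int)
    (hj : j ≤ (A.length : Int)) (hf : (A.length : Int) ≤ j + fuel) :
    j ≤ solInner A v fuel j ∧
    solInner A v fuel j ≤ (A.length : Int) ∧
    (solInner A v fuel j < (A.length : Int) → PySem.List.pyGetD A (solInner A v fuel j) 0 = v) ∧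
    (∀ k, j ≤ k → k < solInner A v fuel j → PySem.List.pyGetD A k 0 ≠ v) := by
  induction fuel generalizing j with
  | zero =>
      simp only [solInner]
      exact ⟨le_refl j, hj, fun h => by omega, fun k hk1 hk2 => by omega⟩
  | succ fuel ih =>
      simp only [solInner]
      by_cases hjn : j < (A.length : Int)
      · rw [if_pos hjn]
        by_cases hne : PySem.List.pyGetD A j 0 ≠ v
        · rw [if_pos hne]
          obtain ⟨ih1, ih2, ih3, ih4⟩ := ih (j + 1) (by omega) (by omega)
          refine ⟨by omega, ih2, ih3, ?_⟩
          intro k hk1 hk2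
          by_cases hkj : k = j
          · subst hkj; exact hne
          · exact ih4 k (by omega) hk2
        · rw [if_neg hne]
          exact ⟨le_refl j, by omega, fun _ => not_not.mp hne, fun k hk1 hk2 => by omega⟩
      · rw [if_neg hjn]
        exact ⟨le_refl j, hj, fun h => by omega, fun k hk1 hk2 => by omega⟩

theorem popStack_sub (i : Int) (s : List Int) : ∀ x ∈ popStack i s, x ∈ s := by
  induction s with
  | nil => simp [popStack]
  | cons a rest ih =>
      intro x hx
      by_cases ha : a ≤ i
      · simp only [popStack, if_pos ha] at hx
        exact List.mem_cons_of_mem a (ih x hx)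
      · simpa only [popStack, if_neg ha] using hx

theorem popStack_pairwise (i : Int) (s : List Int) (h : s.Pairwise (· < ·)) :
    (popStack i s).Pairwise (· < ·) := by
  induction s with
  | nil => simp [popStack]
  | cons a rest ih =>
      by_cases ha : a ≤ i
      · simp only [popStack, if_pos ha]; exact ih (List.Pairwise.of_cons h)
      · simpa only [popStack, if_neg ha]

theorem popStack_mem_of_gt (i : Int) (s : List Int) (h : s.Pairwise (· < ·)) :
    ∀ x ∈ s, i < x → x ∈ popStack i s := by
  induction s with
  | nil => simp
  | cons a rest ih =>
      intro x hx hix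
      by_cases ha : a ≤ i
      · simp only [popStack, if_pos ha]
        rcases List.mem_cons.mp hx with rfl | hx'
        · omega
        · exact ih (List.Pairwise.of_cons h) x hx' hix
      · simpa only [popStack, if_neg ha]

theorem popStack_headD_gt (i : Int) (s : List Int) (h : popStack i s ≠ []) :
    i < (popStack i s).headD 0 := by
  induction s with
  | nil => simp [popStack] at h
  | cons x xs ih =>
      by_cases hx : x ≤ i
      · simp only [popStack, if_pos hx] at h ⊢; exact ih h
      · simp only [popStack, if_neg hx]; simpa using by omega

-- characterisation of the occurrence-stack construction
theorem build_fold (A : List Int) (l : List Int) (d : PySem.Dict Int (List Int)) (v : Int) :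
    ((l.foldl (fun d idx => d.modify (PySem.List.pyGetD A idx 0) [] (fun L => idx :: L)) d).getD v [])
      = (l.filter (fun idx => PySem.List.pyGetD A idx 0 == v)).reverse ++ d.getD v [] := by
  induction l generalizing d with
  | nil => simp
  | cons x l ih =>
      simp only [List.foldl_cons, ih, List.filter_cons]
      by_cases hv : PySem.List.pyGetD A x 0 = v
      · simp [hv]
      · simp [hv, PySem.Dict.getD_modify, Ne.symm hv]

theorem buildOcc_getD (A : List Int) (v : Int) :
    (buildOcc A).getD v []
      = ((PySem.List.pyRange ((A.length : Int) - 1) (-1) (-1)).filter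
          (fun idx => PySem.List.pyGetD A idx 0 == v)).reverse := by
  unfold buildOcc
  rw [build_fold]
  simp [PySem.Dict.getD_empty]

theorem buildOcc_inv (A : List Int) : LoopInv A (buildOcc A) 0 := by
  intro v
  rw [buildOcc_getD]
  have hmem : ∀ x : Int,
      x ∈ ((PySem.List.pyRange ((A.length : Int) - 1) (-1) (-1)).filter
          (fun idx => PySem.List.pyGetD A idx 0 == v)).reverse
        ↔ (0 ≤ x ∧ x < (A.length : Int) ∧ PySem.List.pyGetD A x 0 = v) := by
    intro x
    simp [List.mem_filter, PySem.List.mem_pyRange_neg_one]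
    omega
  have hrange : (PySem.List.pyRange ((A.length : Int) - 1) (-1) (-1)).Pairwise (fun a b => b < a) := by
    have h1 : PySem.List.pyRange ((A.length : Int) - 1) (-1) (-1)
        = (PySem.List.pyRange 0 (A.length : Int) 1).reverse := by
      have := PySem.List.pyRange_neg_one_eq_reverse ((A.length : Int) - 1) (-1)
      simpa using this
    rw [h1, List.pairwise_reverse]
    exact PySem.List.pairwise_lt_pyRange_one 0 (A.length : Int)
  refine ⟨?_, ?_, ?_⟩
  · rw [List.pairwise_reverse]
    exact List.Pairwise.filter _ hrange
  · intro t ht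
    exact ((hmem t).mp ht)
  · intro k hk0 hkn hkv _
    exact (hmem k).mpr ⟨hk0, hkn, hkv⟩

-- the two loops agree, in fuel lockstep, whenever the invariant holds
theorem loop_eq (A S : List Int) (fuel : Nat) :
    ∀ (occ : PySem.Dict Int (List Int)) (c i : Int), 0 ≤ i → LoopInv A occ i →
      solLoop A S fuel c i = altLoop A S fuel occ c i := by
  induction fuel with
  | zero => intro occ c i _ _; rfl
  | succ fuel ih =>
      intro occ c i h0 hInv
      simp only [solLoop, altLoop]
      by_cases hi : i < (A.length : Int)
      · rw [if_pos hi, if_pos hi]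
        by_cases hne : PySem.List.pyGetD A i 0 ≠ PySem.List.pyGetD S i 0
        · rw [if_pos hne, if_pos hne]
          -- mismatch: A scans forward, B pops its stack
          set v := PySem.List.pyGetD S i 0 with hv
          obtain ⟨hpw, hel, hcomp⟩ := hInv v
          set L := occ.getD v [] with hLdef
          set s := popStack i L with hsdef
          obtain ⟨hge, hle, hval, hnone⟩ :=
            solInner_spec A v (A.length + 1) (i + 1) (by omega) (by omega)
          set r := solInner A v (A.length + 1) (i + 1) with hrdef
          by_cases hsnil : s = []
          · -- no later occurrence: both jump past the end
            have hr : r = (A.length : Int) := by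
              rcases lt_or_ge r (A.length : Int) with hlt | hge2
              · exfalso
                have hrL : r ∈ L := hcomp r (by omega) hlt (hval hlt) (by omega)
                have : r ∈ s := by
                  rw [hsdef]; exact popStack_mem_of_gt i L hpw r hrL (by omega)
                rw [hsnil] at this; simp at this
              · omega
            rw [hr, if_pos hsnil, hsnil]
            apply ih
            · omega
            · intro w
              by_cases hw : w = v
              · subst hw
                rw [PySem.Dict.getD_insert_self]
                exact ⟨List.Pairwise.nil, by simp, fun k hk0 hkn hkv hkt => by omega⟩
              · rw [PySem.Dict.getD_insert, if_neg hw]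
                obtain ⟨h1, h2, h3⟩ := hInv w
                exact ⟨h1, h2, fun k hk0 hkn hkv hkt => by omega⟩
          · -- next occurrence t is on top of B's stack and equals A's scan result
            obtain ⟨t, rest, hcons⟩ := List.exists_cons_of_ne_nil hsnil
            have htL : t ∈ L := by
              apply popStack_sub i L t
              rw [← hsdef, hcons]; exact List.mem_cons_self
            obtain ⟨ht0, htn, htv⟩ := hel t htL
            have hit : i < t := by
              have h' := popStack_headD_gt i L (hsdef ▸ hsnil)
              rw [← hsdef, hcons] at h'; simpa using h'
            have hpw' : s.Pairwise (· < ·) := hsdef ▸ popStack_pairwise i L hpw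
            have hrt : r = t := by
              rcases lt_trichotomy r t with hlt | heq | hgt
              · exfalso
                have hrn : r < (A.length : Int) := by omega
                have hrL : r ∈ L := hcomp r (by omega) hrn (hval hrn) (by omega)
                have hrs : r ∈ s := by
                  rw [hsdef]; exact popStack_mem_of_gt i L hpw r hrL (by omega)
                rw [hcons] at hrs hpw'
                rcases List.mem_cons.mp hrs with rfl | hrrest
                · omega
                · have := (List.pairwise_cons.mp hpw').1 r hrrest; omega
              · exact heq
              · exact absurd htv (hnone t (by omega) hgt)
            have hhead : (if s = [] then (A.length : Int) else s.headD 0) = t := by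
              rw [if_neg hsnil, hcons]; rfl
            have htail : s.tail = rest := by simp [hcons]
            rw [hhead, hrt, htail]
            -- recurse with the invariant re-established at position t + 1
            apply ih
            · omega
            rw [hcons] at hpw'
            intro w
            by_cases hw : w = v
            · subst hw
              rw [PySem.Dict.getD_insert_self]
              refine ⟨List.Pairwise.of_cons hpw', ?_, ?_⟩
              · intro x hx
                have hxs : x ∈ popStack i L := by
                  rw [← hsdef, hcons]; exact List.mem_cons_of_mem t hx
                exact hel x (popStack_sub i L x hxs)
              · intro k hk0 hkn hkv hkt
                have hkL : k ∈ L := hcomp k hk0 hkn hkv (by omega)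
                have hks : k ∈ s := by
                  rw [hsdef]; exact popStack_mem_of_gt i L hpw k hkL (by omega)
                rw [hcons] at hks
                rcases List.mem_cons.mp hks with rfl | hk'
                · omega
                · exact hk'
            · rw [PySem.Dict.getD_insert, if_neg hw]
              obtain ⟨h1, h2, h3⟩ := hInv w
              exact ⟨h1, h2, fun k hk0 hkn hkv hkt => h3 k hk0 hkn hkv (by omega)⟩
        · rw [if_neg hne, if_neg hne]
          -- match: both advance by one
          apply ih
          · omega
          intro w
          obtain ⟨h1, h2, h3⟩ := hInv w
          exact ⟨h1, h2, fun k hk0 hkn hkv hkt => h3 k hk0 hkn hkv (by omega)⟩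
      · rw [if_neg hi, if_neg hi]

-- ===== VERDICT (by name: the statement is the Claim_ definition above) =====
theorem solution_spec : Claim_equal_solution := by
  intro A _
  unfold Spec_solution solution solution_alt
  exact loop_eq A (PySem.List.sorted A (fun x => x) false) (A.length + 1) (buildOcc A) 0 0
    (by omega) (buildOcc_inv A)
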